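-- pv_equiv track=rewrite | github.com/sfeucht/annotation_evaluation | 3.topic_analysis.py | presence_of_argument
-- ===== SOURCE A (Python) =====
-- def presence_of_argument(Doc_container, t_dict, index): # produces a dict of narrative presence for each document (with 0 for
-- # no narrative and 1 for some narrative), called by p_of_arg_topic_correl_calc
--
--     rating_dict = {}
--
--     for topic_id in t_dict.keys():
--         for annotator in Doc_container.keys():
--             for doc_id in Doc_container[annotator].keys():
--
--                 ratings = Doc_container[annotator][doc_id]
--
--                 if doc_id == topic_id: # to match IDs across dicts
--
--                     if (ratings[index] == 'NA') or (ratings[index] == '0'): # adds 0 for no argument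
--                         if(doc_id not in rating_dict):
--                             rating_dict[doc_id] = {}
--                             rating_dict[doc_id] = 0
--                     if (ratings[index] != 'NA') and (ratings[index] != '0'): # adds 1 for some argument
--                         if(doc_id not in rating_dict):
--                             rating_dict[doc_id] = {}
--                             rating_dict[doc_id] = 1
--     return rating_dict
-- ===== SOURCE B (Python) =====
-- def presence_of_argument(Doc_container, t_dict, index):
--     # One pass over annotators/docs to record each doc_id's first ratings list,
--     # then one pass over t_dict: O(A*D + T) instead of A's O(T*A*D).
--     first = {}
--     for docs in Doc_container.values():
--         for doc_id, ratings in docs.items():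
--             if doc_id not in first:
--                 first[doc_id] = ratings
--     rating_dict = {}
--     for doc_id in t_dict:
--         if doc_id in first:
--             r = first[doc_id][index]
--             rating_dict[doc_id] = 0 if (r == 'NA' or r == '0') else 1
--     return rating_dict
-- ===== Notes on version B (the rewrite author's own statement) =====
-- stated objective: faster
-- what changed: B replaces the topic-by-topic rescan of all annotators/docs with a single pass that records each doc_id's first ratings list, then maps t_dict's keys through that index.
import Mathlib
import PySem

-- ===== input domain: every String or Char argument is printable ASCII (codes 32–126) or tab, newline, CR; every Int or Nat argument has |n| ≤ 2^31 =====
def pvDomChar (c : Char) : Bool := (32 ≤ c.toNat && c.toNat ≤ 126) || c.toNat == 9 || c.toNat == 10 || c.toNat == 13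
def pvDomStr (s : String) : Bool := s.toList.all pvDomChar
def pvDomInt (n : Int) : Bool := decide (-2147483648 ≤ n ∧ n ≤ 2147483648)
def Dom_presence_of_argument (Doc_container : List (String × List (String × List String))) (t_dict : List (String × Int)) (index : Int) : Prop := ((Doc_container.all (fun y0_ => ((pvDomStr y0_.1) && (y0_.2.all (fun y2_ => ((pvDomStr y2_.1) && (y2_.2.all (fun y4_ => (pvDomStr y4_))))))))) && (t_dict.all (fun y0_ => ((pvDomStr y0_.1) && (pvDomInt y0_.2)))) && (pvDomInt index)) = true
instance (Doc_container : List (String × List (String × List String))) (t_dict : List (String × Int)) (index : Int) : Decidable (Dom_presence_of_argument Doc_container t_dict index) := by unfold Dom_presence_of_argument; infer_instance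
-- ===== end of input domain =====

-- B replaces A's topic×annotator×doc triple loop by one pass recording each doc_id's first
-- ratings list and one pass over t_dict's keys (objective: faster, asymptotic).

-- ===== PORT A =====
def presence_of_argument (Doc_container : List (String × List (String × List String))) (t_dict : List (String × Int)) (index : Int) : List (String × Int) :=
  let Dc : PySem.Dict String (PySem.Dict String (List String)) :=
    PySem.Dict.ofList (Doc_container.map (fun p => (p.1, PySem.Dict.ofList p.2)))
  let td : PySem.Dict String Int := PySem.Dict.ofList t_dict
  let rating_dict : PySem.Dict String Int :=
    td.keys.foldl (fun rd topic_id =>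
      Dc.keys.foldl (fun rd annotator =>
        (Dc.getD annotator PySem.Dict.empty).keys.foldl (fun rd doc_id =>
          let ratings := (Dc.getD annotator PySem.Dict.empty).getD doc_id []
          if doc_id == topic_id then
            -- ratings[index]: in range under Pre_; pyGetD's default is never the value A uses there
            let r := PySem.List.pyGetD ratings index ""
            let rd := if r == "NA" || r == "0" then
                        (if !rd.contains doc_id then rd.insert doc_id (0 : Int) else rd) else rd
            if r != "NA" && r != "0" then
              (if !rd.contains doc_id then rd.insert doc_id (1 : Int) else rd) else rd
          else rd) rd) rd) PySem.Dict.empty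
  rating_dict.items

-- ===== PORT B =====
def presence_of_argument_alt (Doc_container : List (String × List (String × List String))) (t_dict : List (String × Int)) (index : Int) : List (String × Int) :=
  let Dc : PySem.Dict String (PySem.Dict String (List String)) :=
    PySem.Dict.ofList (Doc_container.map (fun p => (p.1, PySem.Dict.ofList p.2)))
  let td : PySem.Dict String Int := PySem.Dict.ofList t_dict
  let first : PySem.Dict String (List String) :=
    Dc.values.foldl (fun f docs =>
      docs.items.foldl (fun f p => if f.contains p.1 then f else f.insert p.1 p.2) f)
      PySem.Dict.empty
  let rating_dict : PySem.Dict String Int :=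
    td.keys.foldl (fun out doc_id =>
      match first.get? doc_id with
      | some ratings =>
          let r := PySem.List.pyGetD ratings index ""
          out.insert doc_id (if r == "NA" || r == "0" then (0 : Int) else 1)
      | none => out) PySem.Dict.empty
  rating_dict.items

-- ===== PRECONDITION & SPEC =====
-- A raises IndexError iff some doc whose id is a t_dict key has ratings[index] out of range
-- (range test on the dict view of the inputs, i.e. after Python's own duplicate-key collapse).
def Pre_presence_of_argument (Doc_container : List (String × List (String × List String))) (t_dict : List (String × Int)) (index : Int) : Prop :=
  ∀ p ∈ (PySem.Dict.ofList (Doc_container.map (fun y => (y.1, PySem.Dict.ofList y.2)))).items,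
    ∀ q ∈ p.2.items, (PySem.Dict.ofList t_dict).contains q.1 = true →
      PySem.Raise.InRange q.2.length index
instance (Doc_container : List (String × List (String × List String))) (t_dict : List (String × Int)) (index : Int) : Decidable (Pre_presence_of_argument Doc_container t_dict index) := by unfold Pre_presence_of_argument; infer_instance
def pvWitness_presence_of_argument : (List (String × List (String × List String))) × (List (String × Int)) × Int :=
  ([("a1", [("d1", ["NA", "5"]), ("d2", ["0"])]), ("a2", [("d1", ["7"])])], [("d1", 1), ("d3", 0)], 0)

def Spec_presence_of_argument (Doc_container : List (String × List (String × List String))) (t_dict : List (String × Int)) (index : Int) (out : List (String × Int)) : Prop := out = presence_of_argument_alt Doc_container t_dict index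
instance (Doc_container : List (String × List (String × List String))) (t_dict : List (String × Int)) (index : Int) (out : List (String × Int)) : Decidable (Spec_presence_of_argument Doc_container t_dict index out) := by unfold Spec_presence_of_argument; infer_instance

-- ===== CLAIM (what is proved, stated in full; the proofs are below) =====
def Claim_equal_presence_of_argument : Prop := ∀ (Doc_container : List (String × List (String × List String))) (t_dict : List (String × Int)) (index : Int), Dom_presence_of_argument Doc_container t_dict index → Pre_presence_of_argument Doc_container t_dict index → Spec_presence_of_argument Doc_container t_dict index (presence_of_argument Doc_container t_dict index)

-- ===== LEMMAS AND PROOFS =====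

-- the 0/1 flag both programs attach to a doc's ratings list
def pvFlag (index : Int) (r : List String) : Int :=
  if PySem.List.pyGetD r index "" == "NA" || PySem.List.pyGetD r index "" == "0" then 0 else 1

-- the ratings of the first occurrence of doc id t in the flattened occurrence list
def pvFind (occ : List (String × List String)) (t : String) : Option (List String) :=
  (occ.find? (fun p => p.1 == t)).map (·.2)

-- every item pair of a dict built from a list is an element of that list
theorem pv_mem_foldl_insert {ν : Type} (l : List (String × ν)) :
    ∀ (d : PySem.Dict String ν) (p : String × ν),
      p ∈ (l.foldl (fun d q => d.insert q.1 q.2) d).items → p ∈ d.items ∨ p ∈ l := by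
  induction l with
  | nil => intro d p hp; exact Or.inl hp
  | cons a rest ih =>
    intro d p hp
    rcases ih (d.insert a.1 a.2) p hp with h | h
    · rw [PySem.Dict.mem_items_insert] at h
      rcases h with rfl | ⟨h, _⟩
      · exact Or.inr (List.mem_cons_self)
      · exact Or.inl h
    · exact Or.inr (List.mem_cons_of_mem a h)

theorem pv_mem_items_ofList {ν : Type} (l : List (String × ν)) (p : String × ν)
    (hp : p ∈ (PySem.Dict.ofList l).items) : p ∈ l := by
  rcases pv_mem_foldl_insert l PySem.Dict.empty p hp with h | h
  · simp [PySem.Dict.empty] at h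
  · exact h

-- A's per-topic step on one (doc_id, ratings) occurrence, as a named function
def pvStepA (index : Int) (t : String) (rd : PySem.Dict String Int) (p : String × List String) :
    PySem.Dict String Int :=
  if p.1 == t then
    let r := PySem.List.pyGetD p.2 index ""
    let rd := if r == "NA" || r == "0" then
                (if !rd.contains p.1 then rd.insert p.1 (0 : Int) else rd) else rd
    if r != "NA" && r != "0" then
      (if !rd.contains p.1 then rd.insert p.1 (1 : Int) else rd) else rd
  else rd

theorem pvStepA_miss (index : Int) (t : String) (rd : PySem.Dict String Int)
    (p : String × List String) (h : (p.1 == t) = false) : pvStepA index t rd p = rd := by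
  simp [pvStepA, h]

theorem pvStepA_hit (index : Int) (t : String) (rd : PySem.Dict String Int)
    (p : String × List String) (h : (p.1 == t) = true) :
    pvStepA index t rd p = if rd.contains t then rd else rd.insert t (pvFlag index p.2) := by
  have ht : p.1 = t := eq_of_beq h
  by_cases hflag : (PySem.List.pyGetD p.2 index "" == "NA" || PySem.List.pyGetD p.2 index "" == "0") = true
  · have hb : (PySem.List.pyGetD p.2 index "" != "NA" && PySem.List.pyGetD p.2 index "" != "0") = false := by
      rcases Bool.or_eq_true_iff.mp hflag with h1 | h1 <;> rw [eq_of_beq h1] <;> decide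
    simp only [pvStepA, hflag, hb, Bool.false_eq_true, if_false, pvFlag, ht]
    by_cases hc : rd.contains t = true <;> simp [hc]
  · have hflag' : (PySem.List.pyGetD p.2 index "" == "NA" || PySem.List.pyGetD p.2 index "" == "0") = false := by
      simpa using hflag
    have hb : (PySem.List.pyGetD p.2 index "" != "NA" && PySem.List.pyGetD p.2 index "" != "0") = true := by
      rcases Bool.or_eq_false_iff.mp hflag' with ⟨h1, h2⟩
      simp [bne, h1, h2]
    simp only [pvStepA, hflag', hb, Bool.false_eq_true, if_false, if_true, pvFlag, ht]
    by_cases hc : rd.contains t = true <;> simp [hc]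

-- A's scan over all occurrences for one topic t: the first occurrence with id t decides
theorem pv_innerA (index : Int) (t : String) :
    ∀ (occ : List (String × List String)) (rd : PySem.Dict String Int),
      occ.foldl (pvStepA index t) rd
      = match pvFind occ t with
        | none => rd
        | some r => if rd.contains t then rd else rd.insert t (pvFlag index r) := by
  intro occ
  induction occ with
  | nil => intro rd; simp [pvFind]
  | cons a rest ih =>
    intro rd
    rw [List.foldl_cons]
    by_cases h : (a.1 == t) = true
    · have hfind : pvFind (a :: rest) t = some a.2 := by simp [pvFind, List.find?, h]
      rw [hfind, pvStepA_hit index t rd a h, ih]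
      cases hf : pvFind rest t with
      | none => rfl
      | some r =>
        by_cases hc : rd.contains t = true
        · simp [hc]
        · simp [hc, PySem.Dict.contains_insert_self]
    · have h' : (a.1 == t) = false := by simpa using h
      have hfind : pvFind (a :: rest) t = pvFind rest t := by simp [pvFind, List.find?, h']
      rw [hfind, pvStepA_miss index t rd a h', ih]

-- B's first-wins dict lookup = first occurrence in the flattened occurrence list
theorem pv_firstGet (t : String) :
    ∀ (occ : List (String × List String)) (f : PySem.Dict String (List String)),
      (occ.foldl (fun f p => if f.contains p.1 then f else f.insert p.1 p.2) f).get? t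
      = match f.get? t with
        | some v => some v
        | none => pvFind occ t := by
  intro occ
  induction occ with
  | nil => intro f; rw [List.foldl_nil]; cases hf : f.get? t <;> simp [pvFind]
  | cons a rest ih =>
    intro f
    rw [List.foldl_cons]
    by_cases hc : f.contains a.1 = true
    · simp only [hc, if_true]
      rw [ih f]
      cases hf : f.get? t with
      | some v => rfl
      | none =>
        have hat : (a.1 == t) = false := by
          by_contra hne
          have : a.1 = t := by
            have := Bool.of_not_eq_false hne
            exact eq_of_beq this
          rw [this] at hc
          rw [(PySem.Dict.get?_eq_none_iff_contains f t).mp hf] at hc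
          simp at hc
        simp [pvFind, List.find?, hat]
    · have hcf : f.contains a.1 = false := by simpa using hc
      simp only [hcf, Bool.false_eq_true, if_false]
      rw [ih]
      by_cases hat : (a.1 == t) = true
      · have ht : a.1 = t := eq_of_beq hat
        have hf : f.get? t = none := by
          rw [PySem.Dict.get?_eq_none_iff_contains, ← ht]; exact hcf
        rw [PySem.Dict.get?_insert, if_pos ht.symm, hf]
        simp [pvFind, List.find?, hat]
      · have hat' : (a.1 == t) = false := by simpa using hat
        have : t ≠ a.1 := fun he => by simp [he] at hat'
        rw [PySem.Dict.get?_insert, if_neg this]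
        cases hf : f.get? t <;> simp [pvFind, List.find?, hat']

-- over distinct topics the contains-guard of A's insert never fires
theorem pv_outer (g : String → Option (List String)) (index : Int) :
    ∀ (ts : List String) (rd : PySem.Dict String Int), ts.Nodup →
      (∀ t ∈ ts, rd.contains t = false) →
      ts.foldl (fun rd t => match g t with
        | none => rd
        | some r => if rd.contains t then rd else rd.insert t (pvFlag index r)) rd
      = ts.foldl (fun out t => match g t with
        | some r => out.insert t (pvFlag index r)
        | none => out) rd := by
  intro ts
  induction ts with
  | nil => intro rd _ _; rfl
  | cons t rest ih =>
    intro rd hnd hco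
    have hrest : rest.Nodup := (List.nodup_cons.mp hnd).2
    have htni : t ∉ rest := (List.nodup_cons.mp hnd).1
    rw [List.foldl_cons, List.foldl_cons]
    cases hg : g t with
    | none => exact ih rd hrest (fun t' ht' => hco t' (List.mem_cons_of_mem t ht'))
    | some r =>
      simp only [hco t List.mem_cons_self, Bool.false_eq_true, if_false]
      exact ih (rd.insert t (pvFlag index r)) hrest (fun t' ht' => by
        rw [PySem.Dict.contains_insert]
        have h1 : (t' == t) = false := by
          have : t' ≠ t := fun he => htni (he ▸ ht')
          simpa using this
        rw [h1, hco t' (List.mem_cons_of_mem t ht')]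
        rfl)

-- ===== VERDICT (by name: the statement is the Claim_ definition above) =====
theorem presence_of_argument_spec : Claim_equal_presence_of_argument := by
  intro Doc_container t_dict index _ _
  unfold Spec_presence_of_argument presence_of_argument presence_of_argument_alt
  set Dc : PySem.Dict String (PySem.Dict String (List String)) :=
    PySem.Dict.ofList (Doc_container.map (fun p => (p.1, PySem.Dict.ofList p.2))) with hDc
  set td : PySem.Dict String Int := PySem.Dict.ofList t_dict with htd
  have hDcnd : Dc.keys.Nodup := PySem.Dict.nodup_keys_ofList _
  have htdnd : td.keys.Nodup := PySem.Dict.nodup_keys_ofList _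
  set occ : List (String × List String) := (Dc.items.map (fun q => q.2.items)).flatten with hocc
  -- inner dicts have Nodup keys
  have hinnd : ∀ k ∈ Dc.keys, (Dc.getD k PySem.Dict.empty).keys.Nodup := by
    intro k hk
    have hc : Dc.contains k = true := (PySem.Dict.contains_iff_mem_keys Dc k).mpr hk
    rw [PySem.Dict.contains_eq_isSome_get?] at hc
    rcases Option.isSome_iff_exists.mp hc with ⟨dd, hdd⟩
    rw [PySem.Dict.getD_of_get?_eq_some Dc PySem.Dict.empty hdd]
    have hmem : (k, dd) ∈ Dc.items := PySem.Dict.mem_items_of_get?_eq_some Dc hdd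
    have hmem' := pv_mem_items_ofList _ _ (hDc ▸ hmem)
    rcases List.mem_map.mp hmem' with ⟨y, _, hy⟩
    have : dd = PySem.Dict.ofList y.2 := (congrArg Prod.snd hy).symm
    rw [this]
    exact PySem.Dict.nodup_keys_ofList _
  -- A's annotator/doc double loop for one topic = one pass over the flattened occurrences
  have hAin : ∀ (rd : PySem.Dict String Int) (t : String),
      Dc.keys.foldl (fun rd annotator =>
        (Dc.getD annotator PySem.Dict.empty).keys.foldl (fun rd doc_id =>
          let ratings := (Dc.getD annotator PySem.Dict.empty).getD doc_id []
          if doc_id == t then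
            let r := PySem.List.pyGetD ratings index ""
            let rd := if r == "NA" || r == "0" then
                        (if !rd.contains doc_id then rd.insert doc_id (0 : Int) else rd) else rd
            if r != "NA" && r != "0" then
              (if !rd.contains doc_id then rd.insert doc_id (1 : Int) else rd) else rd
          else rd) rd) rd
      = occ.foldl (pvStepA index t) rd := by
    intro rd t
    rw [hocc, List.foldl_flatten, List.foldl_map]
    conv_rhs => rw [PySem.Dict.items_eq_map_keys Dc hDcnd PySem.Dict.empty, List.foldl_map]
    apply PySem.List.foldl_congr_mem
    intro acc k hk
    show ((Dc.getD k PySem.Dict.empty).keys.foldl _ acc) = (Dc.getD k PySem.Dict.empty).items.foldl (pvStepA index t) acc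
    rw [PySem.Dict.items_eq_map_keys (Dc.getD k PySem.Dict.empty) (hinnd k hk) [], List.foldl_map]
    apply PySem.List.foldl_congr_mem
    intro acc' y _
    rfl
  -- B's first-occurrence dict, read through get?, = pvFind on the same occurrence list
  have hB1 : Dc.values.foldl (fun f docs =>
        docs.items.foldl (fun f p => if f.contains p.1 then f else f.insert p.1 p.2) f)
        PySem.Dict.empty
      = occ.foldl (fun f p => if f.contains p.1 then f else f.insert p.1 p.2)
          PySem.Dict.empty := by
    rw [hocc, List.foldl_flatten, List.foldl_map]
    conv_lhs => rw [show Dc.values = Dc.items.map (fun q => q.2) from rfl, List.foldl_map]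
  have hBget : ∀ t : String,
      (Dc.values.foldl (fun f docs =>
        docs.items.foldl (fun f p => if f.contains p.1 then f else f.insert p.1 p.2) f)
        PySem.Dict.empty).get? t = pvFind occ t := by
    intro t
    rw [hB1, pv_firstGet]
    rw [PySem.Dict.get?_empty]
  -- both sides are the same fold over td.keys
  apply congrArg PySem.Dict.items
  have hA : ∀ (rd : PySem.Dict String Int) (t : String), t ∈ td.keys →
      occ.foldl (pvStepA index t) rd
      = match pvFind occ t with
        | none => rd
        | some r => if rd.contains t then rd else rd.insert t (pvFlag index r) :=
    fun rd t _ => pv_innerA index t occ rd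
  calc td.keys.foldl _ PySem.Dict.empty
      = td.keys.foldl (fun rd t => match pvFind occ t with
          | none => rd
          | some r => if rd.contains t then rd else rd.insert t (pvFlag index r))
          PySem.Dict.empty := by
        apply PySem.List.foldl_congr_mem
        intro rd t ht
        rw [hAin rd t]
        exact hA rd t ht
    _ = td.keys.foldl (fun out t => match pvFind occ t with
          | some r => out.insert t (pvFlag index r)
          | none => out) PySem.Dict.empty := by
        apply pv_outer (pvFind occ) index td.keys PySem.Dict.empty htdnd
        intro t _
        exact PySem.Dict.contains_empty t
    _ = _ := by
        apply PySem.List.foldl_congr_mem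
        intro out t ht
        rw [hBget t]
        cases pvFind occ t <;> rfl
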